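-- pv_equiv track=rewrite | github.com/silencessss/utils | Labeled_Data_Processing/Resize_Point.py | parse_resize
-- ===== SOURCE A (Python) =====
-- def parse_resize(resize_string):
--     pair = []
--     temp = resize_string.split('x')
--     for x in temp:
--         try:
--             n = int(x)
--             if n > 0:
--                 pair.append(n)
--             else:
--                 return None
--         except ValueError:
--             return None
--     if len(pair) == 1:
--         pair.append(pair[0])
--     return tuple(pair[:2])
-- ===== SOURCE B (Python) =====
-- def parse_resize(resize_string):
--     first = second = None
--     rest, more = resize_string, True
--     while more:
--         piece, sep, rest = rest.partition('x')
--         more = bool(sep)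
--         try:
--             n = int(piece)
--         except ValueError:
--             return None
--         if n <= 0:
--             return None
--         if first is None:
--             first = n
--         elif second is None:
--             second = n
--     return (first, second if second is not None else first)
-- ===== Notes on version B (the rewrite author's own statement) =====
-- stated objective: alternative
-- what changed: A splits the whole string into a list, runs a fused try/append loop building a list accumulator, then reshapes it with a length check and a slice; B never builds a list: it streams through the string with str.partition, a do-while loop and two scalar registers (first, second), validating each piece as it is cut off and finishing with the registers directly.
import Mathlib
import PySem

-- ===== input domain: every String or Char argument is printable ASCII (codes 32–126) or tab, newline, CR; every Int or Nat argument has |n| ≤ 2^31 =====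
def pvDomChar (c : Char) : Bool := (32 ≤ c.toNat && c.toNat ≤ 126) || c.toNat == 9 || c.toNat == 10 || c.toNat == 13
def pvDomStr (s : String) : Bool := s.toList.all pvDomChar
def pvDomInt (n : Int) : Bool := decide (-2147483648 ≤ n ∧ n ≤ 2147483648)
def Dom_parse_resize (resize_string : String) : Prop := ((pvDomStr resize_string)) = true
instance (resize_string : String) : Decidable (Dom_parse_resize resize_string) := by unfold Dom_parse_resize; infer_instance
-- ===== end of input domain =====

-- B replaces A's split-into-list / fused append loop / length-check-and-slice pipeline by a
-- partition-driven streaming loop holding two scalar registers; objective: alternative.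

-- ===== PORT A =====
-- the for-loop over the split parts: accumulator `pair`, early return None on a
-- non-int part (ValueError) or a non-positive value
def prLoopA : List (List Char) → List Int → Option (List Int)
  | [], pair => some pair
  | x :: rest, pair =>
    match PySem.Int.ofChars? x with
    | none => none
    | some n => if n > 0 then prLoopA rest (pair ++ [n]) else none

def parse_resize (resize_string : String) : Option (Int × Int) :=
  match prLoopA (PySem.Chars.splitOn resize_string.toList ['x']) [] with
  | none => none
  | some pair =>
    let pair := if h : pair.length = 1 then pair ++ [pair[0]'(by omega)] else pair
    match PySem.List.slice pair none (some 2) with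
    | [a, b] => some (a, b)
    | _ => none

-- ===== PORT B =====
-- the while loop of Source B: `piece, sep, rest = rest.partition('x')` is takeWhile/dropWhile at the
-- first 'x' (exact: str.partition cuts at the first occurrence of the one-char separator);
-- `more = bool(sep)` is the match on the dropWhile remainder, int(piece) with its try/except is
-- PySem.Int.ofChars?, and the two registers first/second are the two Option parameters
def prGoB (rest : List Char) (first second : Option Int) : Option (Int × Int) :=
  let piece := rest.takeWhile (· ≠ 'x')
  match PySem.Int.ofChars? piece with
  | none => none
  | some n =>
    if n ≤ 0 then none
    else
      let st := if first.isNone then (some n, second)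
                else if second.isNone then (first, some n)
                else (first, second)
      match h : rest.dropWhile (· ≠ 'x') with
      | [] =>
        match st.1 with
        | some f => some (f, st.2.getD f)
        | none => none
      | _ :: rest' => prGoB rest' st.1 st.2
termination_by rest.length
decreasing_by
  have hle := List.length_dropWhile_le (fun c => decide (c ≠ 'x')) rest
  simp only [h] at hle
  simp at hle ⊢
  omega

def parse_resize_alt (resize_string : String) : Option (Int × Int) :=
  prGoB resize_string.toList none none

-- ===== PRECONDITION & SPEC =====
def Spec_parse_resize (resize_string : String) (out : Option (Int × Int)) : Prop := out = parse_resize_alt resize_string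
instance (resize_string : String) (out : Option (Int × Int)) : Decidable (Spec_parse_resize resize_string out) := by unfold Spec_parse_resize; infer_instance

-- ===== CLAIM (what is proved, stated in full; the proofs are below) =====
def Claim_equal_parse_resize : Prop := ∀ (resize_string : String), Dom_parse_resize resize_string → Spec_parse_resize resize_string (parse_resize resize_string)

-- ===== LEMMAS AND PROOFS =====

-- the pieces split('x') yields, re-derived as B's recursion at the first 'x' 
def pvPieces (l : List Char) : List (List Char) :=
  match h : l.dropWhile (· ≠ 'x') with
  | [] => [l.takeWhile (· ≠ 'x')]
  | _ :: rest => l.takeWhile (· ≠ 'x') :: pvPieces rest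
termination_by l.length
decreasing_by
  have hle := List.length_dropWhile_le (fun c => decide (c ≠ 'x')) l
  simp only [h] at hle
  simp at hle ⊢
  omega

theorem pvPieces_drop_nil (l : List Char) (h : l.dropWhile (· ≠ 'x') = []) :
    pvPieces l = [l.takeWhile (· ≠ 'x')] := by
  rw [pvPieces.eq_def]; split
  · rfl
  · rename_i d rest hdr; rw [h] at hdr; cases hdr

theorem pvPieces_drop_cons (l rest : List Char) (d : Char) (h : l.dropWhile (· ≠ 'x') = d :: rest) :
    pvPieces l = l.takeWhile (· ≠ 'x') :: pvPieces rest := by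
  rw [pvPieces.eq_def]; split
  · rename_i hdr; rw [h] at hdr; cases hdr
  · rename_i d' rest' hdr; rw [h] at hdr; cases hdr; rfl

theorem pvPieces_ne_nil (l : List Char) : pvPieces l ≠ [] := by
  rw [pvPieces.eq_def]; split <;> simp

theorem pvPieces_headI_tail (l : List Char) :
    (pvPieces l).headI :: (pvPieces l).tail = pvPieces l := by
  cases hp : pvPieces l with
  | nil => exact absurd hp (pvPieces_ne_nil l)
  | cons p ps => simp

theorem pvGo_eq (fuel : Nat) (l cur : List Char) (acc : List (List Char))
    (hf : l.length < fuel) :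
    PySem.Chars.splitOn.go ['x'] fuel l cur acc =
      acc.reverse ++ (cur.reverse ++ (pvPieces l).headI) :: (pvPieces l).tail := by
  induction fuel generalizing l cur acc with
  | zero => omega
  | succ fuel ih =>
    cases l with
    | nil =>
      rw [pvPieces_drop_nil [] (by simp)]
      simp [PySem.Chars.splitOn.go]
    | cons c r =>
      by_cases hc : c = 'x'
      · subst hc
        rw [pvPieces_drop_cons ('x' :: r) r 'x' (by simp [List.dropWhile])]
        have hgo : PySem.Chars.splitOn.go ['x'] (fuel+1) ('x' :: r) cur acc
            = PySem.Chars.splitOn.go ['x'] fuel r [] (cur.reverse :: acc) := by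
          simp [PySem.Chars.splitOn.go, List.isPrefixOf]
        rw [hgo, ih r [] (cur.reverse :: acc) (by simp at hf ⊢; omega)]
        simp [List.takeWhile, pvPieces_headI_tail]
      · have hd : (c :: r).dropWhile (· ≠ 'x') = r.dropWhile (· ≠ 'x') := by
          simp [List.dropWhile, hc]
        have ht : (c :: r).takeWhile (· ≠ 'x') = c :: r.takeWhile (· ≠ 'x') := by
          simp [List.takeWhile, hc]
        have hgo : PySem.Chars.splitOn.go ['x'] (fuel+1) (c :: r) cur acc
            = PySem.Chars.splitOn.go ['x'] fuel r (c :: cur) acc := by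
          simp [PySem.Chars.splitOn.go, List.isPrefixOf]
          intro h; exact absurd h.symm hc
        rw [hgo, ih r (c :: cur) acc (by simp at hf ⊢; omega)]
        cases hdr : r.dropWhile (· ≠ 'x') with
        | nil =>
          rw [pvPieces_drop_nil r hdr, pvPieces_drop_nil (c :: r) (by rw [hd, hdr]), ht]
          simp
        | cons d rest =>
          rw [pvPieces_drop_cons r rest d hdr,
              pvPieces_drop_cons (c :: r) rest d (by rw [hd, hdr]), ht]
          simp

theorem splitOn_eq_pvPieces (l : List Char) :
    PySem.Chars.splitOn l ['x'] = pvPieces l := by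
  have h := pvGo_eq (l.length + 1) l [] [] (by omega)
  rw [PySem.Chars.splitOn, h]
  cases hp : pvPieces l with
  | nil => exact absurd hp (pvPieces_ne_nil l)
  | cons p ps => simp

def pvVals : List (List Char) → Option (List Int)
  | [] => some []
  | p :: ps =>
    match PySem.Int.ofChars? p with
    | none => none
    | some n => if n ≤ 0 then none else (pvVals ps).map (n :: ·)

theorem prLoopA_eq (ps : List (List Char)) (acc : List Int) :
    prLoopA ps acc = (pvVals ps).map (acc ++ ·) := by
  induction ps generalizing acc with
  | nil => simp [prLoopA, pvVals]
  | cons p ps ih =>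
    simp only [prLoopA, pvVals]
    cases hx : PySem.Int.ofChars? p with
    | none => simp
    | some n =>
      by_cases hn : n > 0
      · have hn' : ¬ (n ≤ 0) := by omega
        simp only [hn, if_pos, hn', if_neg, not_false_eq_true, ih]
        cases pvVals ps <;> simp
      · have hn' : n ≤ 0 := by omega
        simp [hn, hn']

def pvG : List (List Char) → Option Int → Option Int → Option (Int × Int)
  | [], first, second =>
    match first with
    | some f => some (f, second.getD f)
    | none => none
  | p :: ps, first, second =>
    match PySem.Int.ofChars? p with
    | none => none
    | some n =>
      if n ≤ 0 then none
      else
        let st := if first.isNone then (some n, second)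
                  else if second.isNone then (first, some n)
                  else (first, second)
        pvG ps st.1 st.2

theorem prGoB_eq_pvG (rest : List Char) (first second : Option Int) :
    prGoB rest first second = pvG (pvPieces rest) first second := by
  induction hn : rest.length using Nat.strong_induction_on generalizing rest first second with
  | _ n ih =>
  subst hn
  rw [prGoB.eq_def]
  cases hx : PySem.Int.ofChars? (rest.takeWhile (· ≠ 'x')) with
  | none =>
    cases hdr : rest.dropWhile (· ≠ 'x') with
    | nil => rw [pvPieces_drop_nil rest hdr]; simp only [pvG, hx]
    | cons d rest' => rw [pvPieces_drop_cons rest rest' d hdr]; simp only [pvG, hx]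
  | some n =>
    by_cases hle : n ≤ 0
    · cases hdr : rest.dropWhile (· ≠ 'x') with
      | nil => rw [pvPieces_drop_nil rest hdr]; simp only [pvG, hx]
      | cons d rest' => rw [pvPieces_drop_cons rest rest' d hdr]; simp only [pvG, hx, if_pos hle]
    · simp only [hx, hle, if_neg, not_false_eq_true]
      split
      · rename_i heq
        rw [pvPieces_drop_nil rest heq]
        simp only [pvG, hx, hle, if_neg, not_false_eq_true]
      · rename_i d rest' heq
        rw [pvPieces_drop_cons rest rest' d heq]
        simp only [pvG, hx, hle, if_neg, not_false_eq_true]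
        have hlt : rest'.length < rest.length := by
          have h2 := List.length_dropWhile_le (fun c => decide (c ≠ 'x')) rest
          rw [heq] at h2; simp at h2; omega
        rw [ih rest'.length hlt rest' _ _ rfl]

theorem pvG_full (f s : Int) (ps : List (List Char)) :
    pvG ps (some f) (some s) = (pvVals ps).map (fun _ => (f, s)) := by
  induction ps with
  | nil => simp [pvG, pvVals]
  | cons p ps ih =>
    simp only [pvG, pvVals]
    cases PySem.Int.ofChars? p with
    | none => simp
    | some n =>
      by_cases hle : n ≤ 0
      · simp [hle]
      · simp only [hle, if_neg, not_false_eq_true]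
        simp only [Option.isNone_some, Bool.false_eq_true, if_neg, not_false_eq_true, ih]
        cases pvVals ps <;> simp

theorem pvG_half (f : Int) (ps : List (List Char)) :
    pvG ps (some f) none = (pvVals ps).map (fun vs => (f, vs.headD f)) := by
  induction ps with
  | nil => simp [pvG, pvVals]
  | cons p ps ih =>
    simp only [pvG, pvVals]
    cases PySem.Int.ofChars? p with
    | none => simp
    | some n =>
      by_cases hle : n ≤ 0
      · simp [hle]
      · simp only [hle, if_neg, not_false_eq_true]
        simp only [Option.isNone_some, Option.isNone_none, Bool.false_eq_true, if_neg,
          not_false_eq_true, if_pos]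
        rw [pvG_full]
        cases pvVals ps <;> simp

theorem parse_resize_eq (s : String) : parse_resize s = parse_resize_alt s := by
  unfold parse_resize parse_resize_alt
  rw [splitOn_eq_pvPieces, prLoopA_eq, prGoB_eq_pvG]
  cases hp : pvPieces s.toList with
  | nil => exact absurd hp (pvPieces_ne_nil s.toList)
  | cons p ps =>
    simp only [pvG, pvVals]
    cases PySem.Int.ofChars? p with
    | none => simp
    | some n =>
      by_cases hle : n ≤ 0
      · simp [hle]
      · simp only [hle, if_neg, not_false_eq_true]
        simp only [Option.isNone_none, if_pos]
        rw [pvG_half]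
        cases hv : pvVals ps with
        | none => simp
        | some vs =>
          simp only [Option.map_some, List.nil_append]
          cases vs with
          | nil =>
            simp only [List.length_cons, List.length_nil]
            rw [PySem.List.slice_to _ (by norm_num : (0:Int) ≤ 2)]
            simp
          | cons v t =>
            simp only [List.length_cons]
            have : ¬ (t.length + 1 + 1 = 1) := by omega
            simp only [this, dif_neg, not_false_eq_true]
            rw [PySem.List.slice_to _ (by norm_num : (0:Int) ≤ 2)]
            simp

-- ===== VERDICT (by name: the statement is the Claim_ definition above) =====
theorem parse_resize_spec : Claim_equal_parse_resize := by
  intro s _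
  unfold Spec_parse_resize
  exact parse_resize_eq s
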